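-- pv_equiv track=rewrite | github.com/sirajhahmadnazeer123/Owlcoder | chocolate fiesta hackerrank.py | solve
-- ===== SOURCE A (Python) =====
-- mod=1000000000+7
--
-- def get_even(n):
--     return ((2**n)-1)%mod
--
-- def get_odd(n):
--     return (2**(n-1)-1)%mod
--
-- def solve(a):
--     # Write your code here
--     e=0
--     o=0
--     d=0
--     f=0
--     for i in a:
--         if i&1:
--             o+=1
--         else:
--             e+=1
--     if e!=0:
--         d=get_even(e)
--     if o!=0:
--         f=get_odd(o)
--     s=d%mod+f%mod+(d*f)%mod
--     return int(s%mod)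
-- ===== SOURCE B (Python) =====
-- mod = 1000000000 + 7
--
-- def solve(a):
--     n = len(a)
--     if any(x & 1 for x in a):
--         return (pow(2, n - 1, mod) - 1) % mod
--     return (pow(2, n, mod) - 1) % mod
-- ===== Notes on version B (the rewrite author's own statement) =====
-- stated objective: simpler
-- what changed: Replaces A's even/odd split into two partial subset counts d=2^e-1, f=2^(o-1)-1 fused as d+f+d*f with a single closed-form modular power: 2^(n-1)-1 if any element is odd, else 2^n-1.
import Mathlib
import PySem

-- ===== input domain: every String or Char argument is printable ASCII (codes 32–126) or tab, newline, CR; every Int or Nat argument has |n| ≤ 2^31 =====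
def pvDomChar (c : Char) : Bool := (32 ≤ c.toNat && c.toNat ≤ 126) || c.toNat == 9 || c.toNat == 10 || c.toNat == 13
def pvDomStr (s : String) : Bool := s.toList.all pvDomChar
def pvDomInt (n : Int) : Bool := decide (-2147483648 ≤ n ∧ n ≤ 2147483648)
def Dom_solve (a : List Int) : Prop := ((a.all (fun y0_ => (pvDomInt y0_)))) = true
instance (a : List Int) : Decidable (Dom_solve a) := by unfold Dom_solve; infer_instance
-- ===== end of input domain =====

-- B replaces A's two partial subset counts and their d+f+d*f fusion by a single closed-form
-- modular power with one parity case split (objective: simpler).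

-- ===== PORT A =====
def pvmod : Int := 1000000000 + 7

-- exponent arguments are counts produced by the loop, always ≥ 0 at A's call sites, so .toNat is exact there
def get_even (n : Int) : Int := PySem.Int.mod (2 ^ n.toNat - 1) pvmod

def get_odd (n : Int) : Int := PySem.Int.mod (2 ^ (n - 1).toNat - 1) pvmod

def solve (a : List Int) : Int :=
  let eo := a.foldl
    (fun (p : Int × Int) i =>
      if PySem.Int.band i 1 ≠ 0 then (p.1, p.2 + 1) else (p.1 + 1, p.2)) (0, 0)
  let e := eo.1
  let o := eo.2
  let d := if e ≠ 0 then get_even e else 0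
  let f := if o ≠ 0 then get_odd o else 0
  let s := PySem.Int.mod d pvmod + PySem.Int.mod f pvmod + PySem.Int.mod (d * f) pvmod
  PySem.Int.mod s pvmod

-- ===== PORT B =====
def pvmodB : Int := 1000000000 + 7

def solve_alt (a : List Int) : Int :=
  let n := a.length
  if a.any (fun x => PySem.Int.band x 1 != 0) then
    PySem.Int.mod (PySem.Int.powMod 2 (n - 1) pvmodB - 1) pvmodB
  else
    PySem.Int.mod (PySem.Int.powMod 2 n pvmodB - 1) pvmodB

-- ===== PRECONDITION & SPEC =====
def Spec_solve (a : List Int) (out : Int) : Prop := out = solve_alt a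
instance (a : List Int) (out : Int) : Decidable (Spec_solve a out) := by unfold Spec_solve; infer_instance

-- ===== CLAIM (what is proved, stated in full; the proofs are below) =====
def Claim_equal_solve : Prop := ∀ (a : List Int), Dom_solve a → Spec_solve a (solve a)

-- ===== LEMMAS AND PROOFS =====

-- A's counting loop computes the two parity counts of the list.
theorem pv_fold_count (a : List Int) (e0 o0 : Int) :
    a.foldl (fun (p : Int × Int) i =>
        if PySem.Int.band i 1 ≠ 0 then (p.1, p.2 + 1) else (p.1 + 1, p.2)) (e0, o0)
      = (e0 + (a.countP (fun x => PySem.Int.band x 1 == 0) : Int),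
         o0 + (a.countP (fun x => PySem.Int.band x 1 != 0) : Int)) := by
  induction a generalizing e0 o0 with
  | nil => simp
  | cons x xs ih =>
    rw [List.foldl_cons]
    by_cases h : PySem.Int.band x 1 = 0
    · rw [if_neg (not_not_intro h), ih]
      simp [h, Prod.ext_iff]; omega
    · rw [if_pos h, ih]
      simp [h, Prod.ext_iff]; omega

theorem pv_modeq (x : Int) : x % 1000000007 ≡ x [ZMOD 1000000007] :=
  Int.emod_emod_of_dvd x dvd_rfl

theorem pv_mm (x : Int) : x % 1000000007 % 1000000007 = x % 1000000007 :=
  Int.emod_emod_of_dvd x dvd_rfl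

theorem pv_subm (x : Int) : (x % 1000000007 - 1) % 1000000007 = (x - 1) % 1000000007 :=
  (pv_modeq x).sub_right 1

-- the fused sum d + f + d*f of the two reduced counts equals the closed form 2^(e+o-1) - 1 mod p
theorem pv_fuse (e o : Nat) (ho : o ≠ 0) :
    ((2 ^ e - 1) % 1000000007 + (2 ^ (o - 1) - 1) % 1000000007 +
        ((2 ^ e - 1) % 1000000007 * ((2 ^ (o - 1) - 1) % 1000000007)) % 1000000007) % 1000000007
      = ((2 : Int) ^ (e + o - 1) - 1) % 1000000007 := by
  have hx : ((2 : Int) ^ (e + o - 1) - 1)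
      = (2 ^ e - 1) + (2 ^ (o - 1) - 1) + (2 ^ e - 1) * (2 ^ (o - 1) - 1) := by
    rw [show e + o - 1 = e + (o - 1) by omega, pow_add]; ring
  rw [hx]
  exact ((pv_modeq _).add (pv_modeq _)).add
    ((pv_modeq _).trans ((pv_modeq _).mul (pv_modeq _)))

-- A's post-loop arithmetic, for parity counts E and O, against B's closed form
theorem pv_arith (E O : Nat) :
    PySem.Int.mod
        (PySem.Int.mod (if (E : Int) ≠ 0 then get_even E else 0) pvmod +
          PySem.Int.mod (if (O : Int) ≠ 0 then get_odd O else 0) pvmod +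
          PySem.Int.mod
            ((if (E : Int) ≠ 0 then get_even E else 0) *
              (if (O : Int) ≠ 0 then get_odd O else 0)) pvmod) pvmod
      = if O ≠ 0 then PySem.Int.mod (PySem.Int.powMod 2 (E + O - 1) pvmodB - 1) pvmodB
        else PySem.Int.mod (PySem.Int.powMod 2 (E + O) pvmodB - 1) pvmodB := by
  have hA : pvmod = (1000000007 : Int) := by norm_num [pvmod]
  have hB : pvmodB = (1000000007 : Int) := by norm_num [pvmodB]
  have hmod : ∀ x : Int, PySem.Int.mod x (1000000007 : Int) = x % 1000000007 := fun x =>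
    PySem.Int.mod_eq_emod_of_pos (by norm_num)
  have hpow : ∀ e : Nat, PySem.Int.powMod 2 e (1000000007 : Int) = 2 ^ e % 1000000007 :=
    fun e => PySem.Int.powMod_eq_emod _ _ (by norm_num)
  by_cases ho : O = 0
  · subst ho
    by_cases he : E = 0
    · subst he
      norm_num [get_even, hA, hB, hmod, hpow]
    · have heI : (E : Int) ≠ 0 := by exact_mod_cast he
      simp only [Nat.cast_zero, ne_eq, not_true_eq_false, ite_false, mul_zero,
        heI, not_false_eq_true, ite_true, get_even, hA, hB, hmod, hpow, Int.toNat_natCast,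
        Int.zero_emod, add_zero]
      rw [pv_subm]
      simp only [pv_mm]
  · have hoI : (O : Int) ≠ 0 := by exact_mod_cast ho
    have htn : ((O : Int) - 1).toNat = O - 1 := by omega
    rw [if_pos ho]
    by_cases he : E = 0
    · subst he
      simp only [Nat.cast_zero, ne_eq, not_true_eq_false, ite_false, hoI, not_false_eq_true,
        ite_true, get_odd, hA, hB, hmod, hpow, htn, zero_mul, Int.zero_emod,
        zero_add, add_zero]
      rw [pv_subm]
      simp only [pv_mm]
    · have heI : (E : Int) ≠ 0 := by exact_mod_cast he
      simp only [heI, hoI, ne_eq, not_false_eq_true, ite_true, get_even, get_odd, hA, hB, hmod, hpow,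
        htn, Int.toNat_natCast]
      rw [pv_mm, pv_mm, pv_subm]
      exact pv_fuse E O ho

theorem pv_main (a : List Int) : solve a = solve_alt a := by
  have hlen : a.length = a.countP (fun x => PySem.Int.band x 1 == 0)
      + a.countP (fun x => PySem.Int.band x 1 != 0) := by
    simpa using List.length_eq_countP_add_countP (l := a) (fun x => PySem.Int.band x 1 == 0)
  simp only [solve, solve_alt, pv_fold_count, zero_add]
  by_cases ho : a.countP (fun x => PySem.Int.band x 1 != 0) = 0
  · have hany : a.any (fun x => PySem.Int.band x 1 != 0) = false := by
      rw [List.any_eq_false]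
      intro x hx
      simpa using List.countP_eq_zero.mp ho x hx
    rw [hlen, ho, hany, Nat.add_zero]
    simpa using pv_arith (a.countP (fun x => PySem.Int.band x 1 == 0)) 0
  · have hany : a.any (fun x => PySem.Int.band x 1 != 0) = true := by
      cases h : a.any (fun x => PySem.Int.band x 1 != 0) with
      | true => rfl
      | false =>
        exact absurd (List.countP_eq_zero.mpr
          (fun x hx => by simpa using List.any_eq_false.mp h x hx)) ho
    rw [hlen, hany]
    have h := pv_arith (a.countP (fun x => PySem.Int.band x 1 == 0))
      (a.countP (fun x => PySem.Int.band x 1 != 0))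
    rw [if_pos ho] at h
    simpa using h

-- ===== VERDICT (by name: the statement is the Claim_ definition above) =====
theorem solve_spec : Claim_equal_solve := by
  intro a _
  exact pv_main a
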